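-- pv_equiv track=rewrite | github.com/dannyrusen/AdventOfCode | 2025/Day2/part2.py | check_valid_id
-- ===== SOURCE A (Python) =====
-- def check_valid_id(product_id: int) -> bool:
--     s = str(product_id)
--     n = len(s)
--
--     is_false = False
--     for i in range(1, n + 1):
--         if not check_sequence(s, i):
--             is_false = True
--             break
--
--     if is_false:
--         return False
--
--     return True
--
-- def check_sequence(s: str, length: int) -> bool:
--     str_part = s[0:length]
--
--     if str_part == s:
--         return True
--
--     for i in range(length, len(s), length ):
--         if str_part != s[i:i+length]:
--             return True
--
--     return False
-- ===== SOURCE B (Python) =====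
-- def check_valid_id(product_id: int) -> bool:
--     # non-periodic iff the digit string is not a repetition of a shorter block:
--     # classic doubled-string test.
--     s = str(product_id)
--     return s not in (s + s)[1:-1]
-- ===== Notes on version B (the rewrite author's own statement) =====
-- stated objective: simpler
-- what changed: Replaced the divisor-block scanning loop and the check_sequence helper with the classic doubled-string test: s is periodic iff s occurs inside (s+s)[1:-1], so the whole function is one library substring search.
import Mathlib
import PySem

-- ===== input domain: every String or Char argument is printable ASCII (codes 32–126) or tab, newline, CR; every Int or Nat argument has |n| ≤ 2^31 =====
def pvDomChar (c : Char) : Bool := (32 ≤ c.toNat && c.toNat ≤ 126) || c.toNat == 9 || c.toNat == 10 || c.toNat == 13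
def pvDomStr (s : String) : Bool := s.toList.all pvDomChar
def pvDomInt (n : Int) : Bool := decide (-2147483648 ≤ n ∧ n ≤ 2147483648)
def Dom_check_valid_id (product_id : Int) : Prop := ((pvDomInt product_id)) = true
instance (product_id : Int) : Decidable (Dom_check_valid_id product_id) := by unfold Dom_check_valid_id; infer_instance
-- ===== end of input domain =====

-- B replaces A's divisor-block scanning (helper check_sequence) by the classic doubled-string
-- periodicity test `s not in (s+s)[1:-1]`: one substring search, no explicit loops.

-- ===== PORT A =====
def check_sequence (s : List Char) (length : Int) : Bool :=
  let str_part := PySem.List.slice s (some 0) (some length)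
  if str_part = s then true
  else
    (PySem.List.pyRange length (s.length : Int) length).any
      (fun i => decide (str_part ≠ PySem.List.slice s (some i) (some (i + length))))

def check_valid_id (product_id : Int) : Bool :=
  let s := PySem.Int.toChars product_id
  let n := s.length
  let is_false := (PySem.List.pyRange 1 ((n : Int) + 1) 1).any (fun i => !check_sequence s i)
  if is_false then false else true

-- ===== PORT B =====
def check_valid_id_alt (product_id : Int) : Bool :=
  let s := PySem.Int.toChars product_id
  !(PySem.Chars.isIn s (PySem.Chars.slice (s ++ s) (some 1) (some (-1))))

-- ===== PRECONDITION & SPEC =====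
def Spec_check_valid_id (product_id : Int) (out : Bool) : Prop := out = check_valid_id_alt product_id
instance (product_id : Int) (out : Bool) : Decidable (Spec_check_valid_id product_id out) := by unfold Spec_check_valid_id; infer_instance

-- ===== CLAIM (what is proved, stated in full; the proofs are below) =====
def Claim_equal_check_valid_id : Prop := ∀ (product_id : Int), Dom_check_valid_id product_id → Spec_check_valid_id product_id (check_valid_id product_id)

-- ===== LEMMAS AND PROOFS =====

-- `t` is a repetition of its length-d prefix
def pvRep (t : List Char) (d : ℕ) : Prop :=
  t = (List.replicate (t.length / d) (t.take d)).flatten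

-- periodic: some proper divisor period
def pvPer (t : List Char) : Prop :=
  ∃ d : ℕ, 0 < d ∧ d < t.length ∧ d ∣ t.length ∧ pvRep t d

-- fixed by some nontrivial rotation
def pvRot (t : List Char) : Prop :=
  ∃ k : ℕ, 0 < k ∧ k < t.length ∧ t.rotate k = t

-- all d-blocks of t equal its d-prefix (A's inner loop condition)
def pvBlocks (t : List Char) (d : ℕ) : Prop :=
  ∀ k : ℕ, 1 ≤ k → k * d < t.length → (t.drop (k * d)).take d = t.take d

lemma pv_toDigitsCore_cons_ne_nil (f n : Nat) (c : Char) (acc : List Char) :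
    Nat.toDigitsCore 10 f n (c :: acc) ≠ [] := by
  induction f generalizing n c acc with
  | zero => simp [Nat.toDigitsCore]
  | succ f ih => simp only [Nat.toDigitsCore]; split; · simp
                 · exact ih _ _ _

lemma pv_toChars_ne_nil (n : Int) : PySem.Int.toChars n ≠ [] := by
  unfold PySem.Int.toChars
  split
  · simp
  · unfold Nat.toDigits
    simp only [Nat.toDigitsCore]
    split
    · simp
    · exact pv_toDigitsCore_cons_ne_nil _ _ _ _

lemma pv_rep_succ (m : ℕ) (u : List Char) :
    (List.replicate (m+1) u).flatten = u ++ (List.replicate m u).flatten := by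
  simp [List.replicate_succ]

lemma pv_rep_comm (m : ℕ) (u : List Char) :
    (List.replicate m u).flatten ++ u = u ++ (List.replicate m u).flatten := by
  induction m with
  | zero => simp
  | succ m ih =>
    rw [pv_rep_succ, List.append_assoc, ih]

lemma pv_comm_rep : ∀ (m : ℕ) (u v : List Char), u ++ v = v ++ u → 0 < u.length →
    v.length = m * u.length → v = (List.replicate m u).flatten := by
  intro m
  induction m with
  | zero =>
    intro u v _ _ hl
    have : v = [] := List.eq_nil_of_length_eq_zero (by omega)
    simp [this]
  | succ m ih =>
    intro u v h hu hl
    have hle : u.length ≤ v.length := by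
      rw [hl]; calc u.length = 1 * u.length := by ring
        _ ≤ (m+1) * u.length := Nat.mul_le_mul_right _ (by omega)
    set v' := v.drop u.length with hv'
    have hpre : v.take u.length = u := by
      have h' := congrArg (List.take u.length) h
      rw [List.take_append, List.take_append] at h'
      have hz : u.length - v.length = 0 := by omega
      simp [hz] at h'
      exact h'.symm
    have hsplit : v = u ++ v' := by
      conv_lhs => rw [← List.take_append_drop u.length v]
      rw [hpre, hv']
    have hcomm' : u ++ v' = v' ++ u := by
      have h2 := h
      rw [hsplit, List.append_assoc] at h2
      exact List.append_cancel_left h2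
    have hlen' : v'.length = m * u.length := by
      rw [hv', List.length_drop, hl, Nat.succ_mul]; omega
    have := ih u v' hcomm' hu hlen'
    rw [hsplit, this, ← pv_rep_succ]

lemma pv_rot_mul (t : List Char) (k : ℕ) (h : t.rotate k = t) :
    ∀ q, t.rotate (q * k) = t := by
  intro q
  induction q with
  | zero => simp
  | succ q ih => rw [Nat.succ_mul, ← List.rotate_rotate, ih, h]

lemma pv_descent (t : List Char) : ∀ k, 0 < k → k < t.length → t.rotate k = t →
    ∃ d, 0 < d ∧ d < t.length ∧ d ∣ t.length ∧ t.rotate d = t := by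
  intro k
  induction k using Nat.strong_induction_on with
  | _ k ih =>
    intro hk hkn hrot
    by_cases hd : k ∣ t.length
    · exact ⟨k, hk, hkn, hd, hrot⟩
    · have hr0 : 0 < t.length % k :=
        Nat.pos_of_ne_zero (fun h0 => hd (Nat.dvd_of_mod_eq_zero h0))
      have hrk : t.length % k < k := Nat.mod_lt _ hk
      have hrrot : t.rotate (t.length % k) = t := by
        have h1 : t.rotate (t.length / k * k + t.length % k) = t := by
          rw [Nat.mul_comm, Nat.div_add_mod]; exact List.rotate_length t
        rw [← List.rotate_rotate, pv_rot_mul t k hrot] at h1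
        exact h1
      exact ih _ hrk hr0 (lt_trans hrk hkn) hrrot

lemma pv_rot_of_rep (t : List Char) (d : ℕ) (hd : 0 < d) (hlt : d < t.length)
    (_hdvd : d ∣ t.length) (hrep : pvRep t d) : t.rotate d = t := by
  unfold pvRep at hrep
  have hlu : (t.take d).length = d := by rw [List.length_take]; omega
  have hm1 : 1 ≤ t.length / d := (Nat.one_le_div_iff hd).mpr (le_of_lt hlt)
  have hm : t.length / d = (t.length / d - 1) + 1 := by omega
  have hrep' : t = t.take d ++ (List.replicate (t.length / d - 1) (t.take d)).flatten := by
    conv_lhs => rw [hrep, hm, pv_rep_succ]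
  have hdrop : t.drop d = (List.replicate (t.length / d - 1) (t.take d)).flatten := by
    conv_lhs => rw [hrep']
    rw [List.drop_append]
    simp [hlu, List.drop_eq_nil_of_le (le_of_eq hlu)]
  rw [List.rotate_eq_drop_append_take (le_of_lt hlt), hdrop, pv_rep_comm, ← pv_rep_succ, ← hm]
  exact hrep.symm

lemma pv_rep_of_rot (t : List Char) (d : ℕ) (hd : 0 < d) (hle : d ≤ t.length)
    (hdvd : d ∣ t.length) (hrot : t.rotate d = t) : pvRep t d := by
  have ht : t.drop d ++ t.take d = t := by
    rw [← List.rotate_eq_drop_append_take hle, hrot]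
  have hlu : (t.take d).length = d := by rw [List.length_take]; omega
  have hcomm : t.take d ++ t.drop d = t.drop d ++ t.take d := by
    rw [List.take_append_drop, ht]
  have hm1 : 1 ≤ t.length / d := (Nat.one_le_div_iff hd).mpr hle
  have hlenv : (t.drop d).length = (t.length / d - 1) * (t.take d).length := by
    obtain ⟨c, hc⟩ := hdvd
    rw [List.length_drop, hlu, hc, Nat.mul_div_cancel_left _ hd, Nat.sub_mul, one_mul,
      Nat.mul_comm]
  have hv := pv_comm_rep (t.length / d - 1) (t.take d) (t.drop d) hcomm (by omega) hlenv
  unfold pvRep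
  conv_lhs => rw [← List.take_append_drop d t, hv]
  rw [← pv_rep_succ, show t.length / d - 1 + 1 = t.length / d from by omega]

lemma pv_per_iff_rot (t : List Char) : pvPer t ↔ pvRot t := by
  constructor
  · rintro ⟨d, hd, hlt, hdvd, hrep⟩
    exact ⟨d, hd, hlt, pv_rot_of_rep t d hd hlt hdvd hrep⟩
  · rintro ⟨k, hk, hkn, hrot⟩
    obtain ⟨d, hd, hlt, hdvd, hrot'⟩ := pv_descent t k hk hkn hrot
    exact ⟨d, hd, hlt, hdvd, pv_rep_of_rot t d hd (le_of_lt hlt) hdvd hrot'⟩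

lemma pv_blocks_dvd (t : List Char) (d : ℕ) (hd : 0 < d) (hlt : d < t.length)
    (hb : pvBlocks t d) : d ∣ t.length := by
  by_contra hnd
  have hdm := Nat.div_add_mod t.length d
  have hmodlt : t.length % d < d := Nat.mod_lt _ hd
  have hmod0 : t.length % d ≠ 0 := fun h0 => hnd (Nat.dvd_of_mod_eq_zero h0)
  have hk : 1 ≤ t.length / d := (Nat.one_le_div_iff hd).mpr (le_of_lt hlt)
  have hlt2 : (t.length / d) * d < t.length := by
    rw [Nat.mul_comm]; omega
  have heq := hb (t.length / d) hk hlt2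
  have hlen := congrArg List.length heq
  rw [List.length_take, List.length_take, List.length_drop] at hlen
  rw [Nat.mul_comm] at hlt2 hlen
  omega

lemma pv_rep_of_blocks_aux (d : ℕ) (hd : 0 < d) : ∀ (m : ℕ) (t : List Char),
    t.length = m * d → pvBlocks t d → t = (List.replicate m (t.take d)).flatten := by
  intro m
  induction m with
  | zero =>
    intro t h _
    simp [List.eq_nil_of_length_eq_zero (by omega : t.length = 0)]
  | succ m ih =>
    intro t hlen hb
    by_cases hm : m = 0
    · subst hm
      have : t.take d = t := List.take_of_length_le (by omega)
      simp [this]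
    · have hmd : d < t.length := by
        rw [hlen, Nat.succ_mul]
        have : 1 ≤ m * d := Nat.one_le_iff_ne_zero.mpr (by positivity)
        omega
      have h1 : (t.drop d).take d = t.take d := by
        have := hb 1 (le_refl 1) (by omega)
        simpa using this
      have hb' : pvBlocks (t.drop d) d := by
        intro k hk hkl
        rw [List.length_drop] at hkl
        have h2 := hb (k + 1) (by omega) (by rw [Nat.succ_mul]; omega)
        rw [List.drop_drop]
        have harg : d + k * d = (k + 1) * d := by ring
        rw [harg, h2, h1]
      have hlen' : (t.drop d).length = m * d := by
        rw [List.length_drop, hlen, Nat.succ_mul]; omega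
      have hrec := ih (t.drop d) hlen' hb'
      rw [h1] at hrec
      conv_lhs => rw [← List.take_append_drop d t, hrec]
      rw [← pv_rep_succ]

lemma pv_blocks_of_rep_aux (u : List Char) (_hu : 0 < u.length) : ∀ (k m : ℕ), k < m →
    (((List.replicate m u).flatten).drop (k * u.length)).take u.length = u := by
  intro k
  induction k with
  | zero =>
    intro m hm
    obtain ⟨m', rfl⟩ : ∃ m', m = m' + 1 := ⟨m - 1, by omega⟩
    rw [pv_rep_succ]
    simp
  | succ k ih =>
    intro m hm
    obtain ⟨m', rfl⟩ : ∃ m', m = m' + 1 := ⟨m - 1, by omega⟩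
    rw [pv_rep_succ, Nat.succ_mul, Nat.add_comm, ← List.drop_drop, List.drop_left]
    exact ih m' (by omega)

lemma pv_blocks_iff (t : List Char) (d : ℕ) (hd : 0 < d) (hlt : d < t.length) :
    pvBlocks t d ↔ d ∣ t.length ∧ pvRep t d := by
  constructor
  · intro hb
    have hdvd := pv_blocks_dvd t d hd hlt hb
    refine ⟨hdvd, ?_⟩
    unfold pvRep
    exact pv_rep_of_blocks_aux d hd (t.length / d) t (by rw [Nat.div_mul_cancel hdvd]) hb
  · rintro ⟨hdvd, hrep⟩
    unfold pvRep at hrep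
    intro k hk hkl
    have hlu : (t.take d).length = d := by rw [List.length_take]; omega
    have hm : k < t.length / d := by
      have h2 : t.length = (t.length / d) * d := (Nat.div_mul_cancel hdvd).symm
      by_contra hge
      rw [Nat.not_lt] at hge
      have : t.length ≤ k * d := by
        rw [h2]; exact Nat.mul_le_mul_right _ hge
      omega
    have := pv_blocks_of_rep_aux (t.take d) (by omega) k (t.length / d) hm
    rw [hlu] at this
    conv_lhs => rw [hrep]
    exact this

lemma pv_cs_false_iff (t : List Char) (i : Int) (h1 : 1 ≤ i) (h2 : i ≤ (t.length : Int)) :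
    check_sequence t i = false ↔ (i.toNat < t.length ∧ i.toNat ∣ t.length ∧ pvRep t i.toNat) := by
  have hi : i = ((i.toNat : ℕ) : Int) := by omega
  set d := i.toNat with hdd
  have hd1 : 1 ≤ d := by omega
  have hdn : d ≤ t.length := by omega
  have hsp : PySem.List.slice t (some 0) (some i) = t.take d := by
    rw [hi, PySem.List.slice_zero_start, PySem.List.slice_to_natCast]
  simp only [check_sequence, hsp]
  by_cases heq : t.take d = t
  · have hled : t.length ≤ d := (List.take_eq_self_iff t).mp heq
    rw [if_pos heq]
    simp only [Bool.true_eq_false, false_iff]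
    rintro ⟨hlt, -, -⟩
    omega
  · have hlt : d < t.length := by
      rcases Nat.lt_or_ge d t.length with h | h
      · exact h
      · exact absurd ((List.take_eq_self_iff t).mpr h) heq
    rw [if_neg heq]
    rw [List.any_eq_false]
    simp only [decide_eq_true_eq, not_not]
    constructor
    · intro hall
      have hb : pvBlocks t d := by
        intro k hk hkl
        have hkd : d ≤ k * d := by nlinarith
        have hmem : ((k * d : ℕ) : Int) ∈ PySem.List.pyRange i (t.length : Int) i := by
          rw [PySem.List.mem_pyRange_iff_of_pos (by omega)]
          refine ⟨by rw [hi]; exact_mod_cast hkd, by exact_mod_cast hkl, ?_⟩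
          rw [hi]
          refine ⟨(k : Int) - 1, ?_⟩
          push_cast
          ring
        have hone := hall _ hmem
        rw [hi, PySem.List.slice_natCast_add] at hone
        exact hone.symm
      rw [pv_blocks_iff t d (by omega) hlt] at hb
      exact ⟨hlt, hb.1, hb.2⟩
    · rintro ⟨-, hdvd, hrep⟩
      have hb : pvBlocks t d := (pv_blocks_iff t d (by omega) hlt).mpr ⟨hdvd, hrep⟩
      intro j hj
      rw [PySem.List.mem_pyRange_iff_of_pos (by omega)] at hj
      obtain ⟨hij, hjn, q, hq⟩ := hj
      have hq0 : 0 ≤ q := by nlinarith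
      have hjk : j = (((q.toNat + 1) * d : ℕ) : Int) := by
        push_cast [Int.toNat_of_nonneg hq0]
        rw [hi] at hq
        linarith [hq]
      have hkd : (q.toNat + 1) * d < t.length := by exact_mod_cast hjk ▸ hjn
      have := hb (q.toNat + 1) (by omega) hkd
      rw [hjk, hi, PySem.List.slice_natCast_add, this]

lemma pv_A_false_iff (pid : Int) :
    check_valid_id pid = false ↔ pvPer (PySem.Int.toChars pid) := by
  simp only [check_valid_id]
  set t := PySem.Int.toChars pid with ht
  have key : (PySem.List.pyRange 1 ((t.length : Int) + 1) 1).any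
      (fun i => !check_sequence t i) = true ↔ pvPer t := by
    rw [List.any_eq_true]
    constructor
    · rintro ⟨i, hmem, hcs⟩
      rw [PySem.List.mem_pyRange_iff_of_pos (by omega)] at hmem
      obtain ⟨hi1, hi2, -⟩ := hmem
      rw [Bool.not_eq_true'] at hcs
      have hres := (pv_cs_false_iff t i hi1 (by omega)).mp hcs
      exact ⟨i.toNat, by omega, hres.1, hres.2.1, hres.2.2⟩
    · rintro ⟨d, hd0, hdn, hdvd, hrep⟩
      refine ⟨(d : Int), ?_, ?_⟩
      · rw [PySem.List.mem_pyRange_iff_of_pos (by omega)]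
        refine ⟨by exact_mod_cast hd0, by exact_mod_cast Nat.lt_add_one_of_lt hdn, ⟨(d : Int) - 1, by ring⟩⟩
      · rw [Bool.not_eq_true']
        apply (pv_cs_false_iff t (d : Int) (by exact_mod_cast hd0) (by exact_mod_cast le_of_lt hdn)).mpr
        refine ⟨by simpa using hdn, by simpa using hdvd, by simpa using hrep⟩
  constructor
  · intro h
    apply key.mp
    by_contra hb
    rw [Bool.not_eq_true] at hb
    rw [hb] at h
    simp at h
  · intro hp
    rw [key.mpr hp]
    simp

lemma pv_prefix_rotate (t : List Char) (k : ℕ) (hk : k ≤ t.length) :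
    t <+: (t ++ t).drop k ↔ t.rotate k = t := by
  rw [List.prefix_iff_eq_take, List.drop_append,
    Nat.sub_eq_zero_of_le hk, List.drop_zero, List.take_append]
  have h2 : (t.drop k).take t.length = t.drop k :=
    List.take_of_length_le (by rw [List.length_drop]; omega)
  have h3 : t.length - (t.drop k).length = k := by rw [List.length_drop]; omega
  rw [h2, h3, ← List.rotate_eq_drop_append_take hk]
  exact eq_comm

lemma pv_B_false_iff (pid : Int) :
    check_valid_id_alt pid = false ↔ pvRot (PySem.Int.toChars pid) := by
  simp only [check_valid_id_alt]
  set t := PySem.Int.toChars pid with ht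
  have htne : t ≠ [] := pv_toChars_ne_nil pid
  have hn : 0 < t.length := List.length_pos_of_ne_nil htne
  rw [Bool.not_eq_false']
  rw [PySem.Chars.slice_eq_listSlice]
  have hL : (t ++ t).length = t.length + t.length := by simp
  have hsl : PySem.List.slice (t ++ t) (some 1) (some (-1)) =
      ((t ++ t).drop 1).take (t.length + t.length - 2) := by
    have hc1 : PySem.List.clampIdx (t ++ t).length 1 = 1 := by
      unfold PySem.List.clampIdx
      rw [hL]
      norm_num
      omega
    have hc2 : PySem.List.clampIdx (t ++ t).length (-1) = t.length + t.length - 1 := by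
      rw [PySem.List.clampIdx_neg_one, hL]
    simp only [PySem.List.slice]
    rw [hc1, hc2, show t.length + t.length - 1 - 1 = t.length + t.length - 2 from by omega]
  rw [hsl, ← PySem.Chars.exists_prefix_drop_iff_isIn]
  constructor
  · rintro ⟨j, hpre⟩
    rw [List.drop_take, List.prefix_take_iff, List.drop_drop] at hpre
    obtain ⟨hpre, hlen⟩ := hpre
    have hrot := (pv_prefix_rotate t (1 + j) (by omega)).mp hpre
    exact ⟨1 + j, by omega, by omega, hrot⟩
  · rintro ⟨k, hk0, hkn, hrot⟩
    refine ⟨k - 1, ?_⟩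
    rw [List.drop_take, List.prefix_take_iff, List.drop_drop]
    rw [show 1 + (k - 1) = k from by omega]
    exact ⟨(pv_prefix_rotate t k (by omega)).mpr hrot, by omega⟩

-- ===== VERDICT (by name: the statement is the Claim_ definition above) =====
theorem check_valid_id_spec : Claim_equal_check_valid_id := by
  intro pid _
  unfold Spec_check_valid_id
  have hA := pv_A_false_iff pid
  have hB := pv_B_false_iff pid
  have h := (pv_per_iff_rot (PySem.Int.toChars pid))
  cases hA' : check_valid_id pid <;> cases hB' : check_valid_id_alt pid <;> simp_all
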